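-- pv_equiv track=rewrite | github.com/HyperONE27/EvoLadderBot | scripts/matchmaking_deep_analysis.py | _equalize_lists
-- ===== SOURCE A (Python) =====
-- from typing import Dict, List, Tuple
--
-- def _equalize_lists(list_x: List, list_y: List, list_z: List) -> Tuple[List, List, List]:
--     """Equalize the sizes of list_x and list_y"""
--     x_copy = list_x.copy()
--     y_copy = list_y.copy()
--     z_copy = list_z.copy()
--
--     if not x_copy and not y_copy and z_copy:
--         for i, player in enumerate(z_copy):
--             if i % 2 == 0:
--                 x_copy.append(player)
--             else:
--                 y_copy.append(player)
--         z_copy = []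
--         return x_copy, y_copy, z_copy
--
--     while z_copy:
--         if len(x_copy) < len(y_copy):
--             x_copy.append(z_copy.pop(0))
--         elif len(x_copy) > len(y_copy):
--             y_copy.append(z_copy.pop(0))
--         else:
--             if z_copy:
--                 x_copy.append(z_copy.pop(0))
--             if z_copy:
--                 y_copy.append(z_copy.pop(0))
--
--     return x_copy, y_copy, z_copy
-- ===== SOURCE B (Python) =====
-- def _equalize_lists(list_x, list_y, list_z):
--     """Equalize the sizes of list_x and list_y"""
--     x = list(list_x)
--     y = list(list_y)
--     z = list(list_z)
--     gap = min(abs(len(x) - len(y)), len(z))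
--     head, rest = z[:gap], z[gap:]
--     if len(x) < len(y):
--         x.extend(head)
--     else:
--         y.extend(head)
--     x.extend(rest[0::2])
--     y.extend(rest[1::2])
--     return x, y, []
-- ===== Notes on version B (the rewrite author's own statement) =====
-- stated objective: faster
-- what changed: Replaces A's per-element while loop with length checks and pop(0) (and its redundant both-empty enumerate special case) by a computed split point: one bulk extend of the shorter list with a front slice of z, then two step-2 slices appended to x and y.
import Mathlib
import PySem

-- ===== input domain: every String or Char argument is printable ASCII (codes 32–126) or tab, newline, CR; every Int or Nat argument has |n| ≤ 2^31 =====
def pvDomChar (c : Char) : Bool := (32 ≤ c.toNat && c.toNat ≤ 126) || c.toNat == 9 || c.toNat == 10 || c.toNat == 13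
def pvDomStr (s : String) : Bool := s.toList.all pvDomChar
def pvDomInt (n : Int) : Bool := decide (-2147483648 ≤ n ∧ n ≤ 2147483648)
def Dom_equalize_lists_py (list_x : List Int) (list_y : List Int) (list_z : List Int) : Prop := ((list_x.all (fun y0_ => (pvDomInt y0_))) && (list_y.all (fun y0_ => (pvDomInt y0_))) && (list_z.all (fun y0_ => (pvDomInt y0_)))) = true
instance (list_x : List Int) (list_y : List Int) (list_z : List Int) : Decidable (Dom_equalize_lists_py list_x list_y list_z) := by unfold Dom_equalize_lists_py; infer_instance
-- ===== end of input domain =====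

-- B replaces A's per-element while loop with pop(0) by a computed split point, two bulk
-- extends and a pair of step-2 slices (objective: faster, O(n) instead of A's O(n^2) pop(0) loop).

-- ===== PORT A =====
-- the 'while z_copy:' loop of A: state (x_copy, y_copy), popping from the front of z_copy
def pvLoopA : List Int → List Int → List Int → List Int × List Int × List Int
  | x, y, [] => (x, y, [])
  | x, y, h :: t =>
    if x.length < y.length then pvLoopA (x ++ [h]) y t
    else if x.length > y.length then pvLoopA x (y ++ [h]) t
    else
      match t with
      | [] => pvLoopA (x ++ [h]) y []
      | h2 :: t2 => pvLoopA (x ++ [h]) (y ++ [h2]) t2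

def equalize_lists_py (list_x : List Int) (list_y : List Int) (list_z : List Int) : List Int × List Int × List Int :=
  if list_x = [] ∧ list_y = [] ∧ list_z ≠ [] then
    -- 'for i, player in enumerate(z_copy): …' then 'z_copy = []'
    let p := (PySem.List.enumerate list_z).foldl
      (fun (p : List Int × List Int) (iv : Int × Int) =>
        if iv.1 % 2 = 0 then (p.1 ++ [iv.2], p.2) else (p.1, p.2 ++ [iv.2]))
      (list_x, list_y)
    (p.1, p.2, [])
  else pvLoopA list_x list_y list_z

-- ===== PORT B =====
-- rest[0::2] / rest[1::2]
mutual
def pvEvens : List Int → List Int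
  | [] => []
  | a :: t => a :: pvOdds t
def pvOdds : List Int → List Int
  | [] => []
  | _ :: t => pvEvens t
end
def equalize_lists_py_alt (list_x : List Int) (list_y : List Int) (list_z : List Int) : List Int × List Int × List Int :=
  let gap := min ((list_x.length : Int) - list_y.length).natAbs list_z.length
  let head := list_z.take gap
  let rest := list_z.drop gap
  let x1 := if list_x.length < list_y.length then list_x ++ head else list_x
  let y1 := if list_x.length < list_y.length then list_y else list_y ++ head
  (x1 ++ pvEvens rest, y1 ++ pvOdds rest, [])

-- ===== PRECONDITION & SPEC =====
def Spec_equalize_lists_py (list_x : List Int) (list_y : List Int) (list_z : List Int) (out : List Int × List Int × List Int) : Prop := out = equalize_lists_py_alt list_x list_y list_z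
instance (list_x : List Int) (list_y : List Int) (list_z : List Int) (out : List Int × List Int × List Int) : Decidable (Spec_equalize_lists_py list_x list_y list_z out) := by unfold Spec_equalize_lists_py; infer_instance

-- ===== CLAIM (what is proved, stated in full; the proofs are below) =====
def Claim_equal_equalize_lists_py : Prop := ∀ (list_x : List Int) (list_y : List Int) (list_z : List Int), Dom_equalize_lists_py list_x list_y list_z → Spec_equalize_lists_py list_x list_y list_z (equalize_lists_py list_x list_y list_z)

-- ===== LEMMAS AND PROOFS =====


theorem alt_nil (x y : List Int) : equalize_lists_py_alt x y [] = (x, y, []) := by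
  unfold equalize_lists_py_alt
  simp [pvEvens, pvOdds]

theorem alt_lt (x y : List Int) (h : Int) (t : List Int) (hlt : x.length < y.length) :
    equalize_lists_py_alt x y (h :: t) = equalize_lists_py_alt (x ++ [h]) y t := by
  unfold equalize_lists_py_alt
  have ha : ((x.length : Int) - y.length).natAbs = y.length - x.length := by omega
  have ha' : (((x ++ [h]).length : Int) - y.length).natAbs = y.length - x.length - 1 := by
    simp; omega
  rw [ha, ha']
  have hg : min (y.length - x.length) (h :: t).length
      = min (y.length - x.length - 1) t.length + 1 := by
    simp; omega
  rw [hg]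
  simp only [List.take_succ_cons, List.drop_succ_cons]
  by_cases hb : x.length + 1 < y.length
  · have h1 : (x ++ [h]).length < y.length := by simp; omega
    simp [hlt, hb]
  · have h0 : y.length - x.length - 1 = 0 := by omega
    have h1 : ¬ (x ++ [h]).length < y.length := by simp; omega
    simp [hlt, h0]

theorem alt_gt (x y : List Int) (h : Int) (t : List Int) (hgt : y.length < x.length) :
    equalize_lists_py_alt x y (h :: t) = equalize_lists_py_alt x (y ++ [h]) t := by
  unfold equalize_lists_py_alt
  have ha : ((x.length : Int) - y.length).natAbs = x.length - y.length := by omega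
  have ha' : ((x.length : Int) - (y ++ [h]).length).natAbs = x.length - y.length - 1 := by
    simp; omega
  rw [ha, ha']
  have hg : min (x.length - y.length) (h :: t).length
      = min (x.length - y.length - 1) t.length + 1 := by
    simp; omega
  rw [hg]
  simp only [List.take_succ_cons, List.drop_succ_cons]
  have h1 : ¬ x.length < y.length := by omega
  have h2 : ¬ x.length < (y ++ [h]).length ∨ x.length < (y ++ [h]).length := by tauto
  by_cases hb : y.length + 1 < x.length
  · have h3 : ¬ x.length < (y ++ [h]).length := by simp; omega
    have h4 : ¬ x.length ≤ y.length := by omega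
    simp [h1, h4]
  · have h0 : x.length - y.length - 1 = 0 := by omega
    have h3 : ¬ x.length < (y ++ [h]).length := by simp; omega
    simp [h1, h0]

theorem alt_eq (x y z : List Int) (heq : x.length = y.length) :
    equalize_lists_py_alt x y z = (x ++ pvEvens z, y ++ pvOdds z, []) := by
  unfold equalize_lists_py_alt
  have ha : ((x.length : Int) - y.length).natAbs = 0 := by omega
  rw [ha]
  simp [heq]

theorem loopA_eq_alt (z x y : List Int) :
    pvLoopA x y z = equalize_lists_py_alt x y z := by
  fun_induction pvLoopA x y z with
  | case1 x y => exact (alt_nil x y).symm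
  | case2 x y h t hlt ih => rw [alt_lt x y h t hlt]; exact ih
  | case3 x y h t h1 hgt ih => rw [alt_gt x y h t (by omega)]; exact ih
  | case4 x y h h1 h2 ih =>
      rw [ih, alt_nil, alt_eq x y [h] (by omega)]
      simp [pvEvens, pvOdds]
  | case5 x y h h1 h2 h3 t2 ih =>
      rw [ih, alt_eq (x ++ [h]) (y ++ [h3]) t2 (by simp; omega),
        alt_eq x y (h :: h3 :: t2) (by omega)]
      simp [pvEvens, pvOdds]

theorem foldl_enum_eq (z : List Int) (x y : List Int) (n : Int) (hn : 0 ≤ n) :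
    ((PySem.List.enumerate z n).foldl
      (fun (p : List Int × List Int) (iv : Int × Int) =>
        if iv.1 % 2 = 0 then (p.1 ++ [iv.2], p.2) else (p.1, p.2 ++ [iv.2]))
      (x, y)) =
    (if n % 2 = 0 then (x ++ pvEvens z, y ++ pvOdds z) else (x ++ pvOdds z, y ++ pvEvens z)) := by
  induction z generalizing x y n with
  | nil =>
    by_cases h : n % 2 = 0 <;> simp [PySem.List.enumerate_nil, h, pvEvens, pvOdds]
  | cons a t ih =>
    rw [PySem.List.enumerate_cons, List.foldl_cons]
    by_cases h : n % 2 = 0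
    · simp only [h, if_pos]
      rw [ih (x ++ [a]) y (n + 1) (by omega)]
      have h1 : ¬ (n + 1) % 2 = 0 := by omega
      simp [h1, pvEvens, pvOdds]
    · simp only [if_neg h]
      rw [ih x (y ++ [a]) (n + 1) (by omega)]
      have h1 : (n + 1) % 2 = 0 := by omega
      simp [h1, pvEvens, pvOdds]

-- ===== VERDICT (by name: the statement is the Claim_ definition above) =====
theorem equalize_lists_py_spec : Claim_equal_equalize_lists_py := by
  intro x y z _
  unfold Spec_equalize_lists_py equalize_lists_py
  split
  · rename_i h
    obtain ⟨hx, hy, hz⟩ := h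
    subst hx; subst hy
    simp only [foldl_enum_eq z [] [] 0 (by norm_num)]
    simp [equalize_lists_py_alt]
  · exact loopA_eq_alt z x y
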